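-- pv_equiv track=rewrite | github.com/HLW168/LintCode | 487 · Name Deduplication.py | nameDeduplication
-- ===== SOURCE A (Python) =====
-- def nameDeduplication(names):
--     # write your code here
--     # 先遍歷，把名字加進去 dict
--     # 再用 list append 的方式 append Key
--     d = dict()
--     res = []
--     for i in range(len(names)):
--         names[i] = names[i].lower()
--         if names[i] not in d:
--             d[names[i]] = 1
--         else:
--             d[names[i]] += 1
--     for k in d.keys():
--         res.append(k)
--     res.sort()
--
--     return res
-- ===== SOURCE B (Python) =====
-- def nameDeduplication(names):
--     # sort-then-scan: lowercase in place, sort a copy, drop adjacent duplicates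
--     for i in range(len(names)):
--         names[i] = names[i].lower()
--     res = []
--     for name in sorted(names):
--         if not res or res[-1] != name:
--             res.append(name)
--     return res
-- ===== Notes on version B (the rewrite author's own statement) =====
-- stated objective: alternative
-- what changed: B replaces A's dict-based dedup (count into a dict, collect keys, sort) by sort-then-scan: sort the lowercased names and drop adjacent duplicates in one pass, maintaining only the previously emitted element instead of a hash table.
import Mathlib
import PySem

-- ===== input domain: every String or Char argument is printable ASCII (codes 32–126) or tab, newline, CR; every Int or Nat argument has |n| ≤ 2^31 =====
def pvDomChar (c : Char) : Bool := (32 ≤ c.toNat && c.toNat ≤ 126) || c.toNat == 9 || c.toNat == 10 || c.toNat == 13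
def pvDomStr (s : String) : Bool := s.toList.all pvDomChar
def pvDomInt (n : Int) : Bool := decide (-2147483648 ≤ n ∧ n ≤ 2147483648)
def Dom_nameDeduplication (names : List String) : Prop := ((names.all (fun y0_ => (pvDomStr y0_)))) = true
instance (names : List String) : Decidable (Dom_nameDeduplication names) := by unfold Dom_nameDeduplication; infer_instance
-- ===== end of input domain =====

-- B deduplicates by sorting the lowercased names and removing adjacent duplicates in one pass,
-- instead of A's dict-then-sort; equivalence is about the RETURN value (both Pythons also
-- lowercase `names` in place, identically).

-- ===== PORT A =====
def nameDeduplication (names : List String) : List String :=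
  let d := names.foldl
    (fun (d : PySem.Dict String Int) n =>
      let k := PySem.Str.lower n
      if d.contains k = false then d.insert k 1 else d.modify k 0 (fun v => v + 1))
    PySem.Dict.empty
  let res := d.keys.foldl (fun res k => res ++ [k]) []
  PySem.List.sorted res (fun s => s)

-- ===== PORT B =====
def nameDeduplication_alt (names : List String) : List String :=
  let lowered := names.map PySem.Str.lower
  (PySem.List.sorted lowered (fun s => s)).foldl
    (fun res name => if res = [] ∨ res.getLast? ≠ some name then res ++ [name] else res) []

-- ===== PRECONDITION & SPEC =====
def Spec_nameDeduplication (names : List String) (out : List String) : Prop := out = nameDeduplication_alt names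
instance (names : List String) (out : List String) : Decidable (Spec_nameDeduplication names out) := by unfold Spec_nameDeduplication; infer_instance

-- ===== CLAIM (what is proved, stated in full; the proofs are below) =====
def Claim_equal_nameDeduplication : Prop := ∀ (names : List String), Dom_nameDeduplication names → Spec_nameDeduplication names (nameDeduplication names)

-- ===== LEMMAS AND PROOFS =====

-- A's dict loop: its keys are exactly the distinct lowercased names in first-occurrence order.
theorem nameDedup_keys_fold (l : List String) (d : PySem.Dict String Int) :
    (l.foldl
      (fun (d : PySem.Dict String Int) n =>
        let k := PySem.Str.lower n
        if d.contains k = false then d.insert k 1 else d.modify k 0 (fun v => v + 1))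
      d).keys = PySem.Set.update d.keys (l.map PySem.Str.lower) := by
  induction l generalizing d with
  | nil => simp [PySem.Set.update_nil]
  | cons x l ih =>
    simp only [List.foldl_cons, List.map_cons, PySem.Set.update_cons]
    rw [ih]
    congr 1
    by_cases h : d.contains (PySem.Str.lower x) = false
    · rw [if_pos h, PySem.Dict.keys_insert_of_not_contains _ _ h,
        PySem.Set.add_of_not_mem]
      intro hmem
      rw [← PySem.Dict.contains_iff_mem_keys] at hmem
      simp [hmem] at h
    · rw [if_neg h, PySem.Dict.keys_modify,
        PySem.Dict.keys_insert_of_contains _ _ (by simpa using h),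
        PySem.Set.add_of_mem]
      rw [← PySem.Dict.contains_iff_mem_keys]
      simpa using h

-- recursion that B's foldl performs: drop an element equal to the last emitted one
def adjDedupGo : Option String → List String → List String
  | _, [] => []
  | last, x :: s => if last ≠ some x then x :: adjDedupGo (some x) s else adjDedupGo last s

theorem foldl_adjDedup (s acc : List String) :
    s.foldl (fun res name => if res = [] ∨ res.getLast? ≠ some name then res ++ [name] else res) acc
      = acc ++ adjDedupGo acc.getLast? s := by
  induction s generalizing acc with
  | nil => simp [adjDedupGo]
  | cons x s ih =>
    simp only [List.foldl_cons]
    by_cases h : acc.getLast? = some x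
    · have hacc : ¬ (acc = [] ∨ acc.getLast? ≠ some x) := by
        rintro (rfl | hne) <;> simp_all
      rw [if_neg hacc, ih, adjDedupGo, if_neg (by simp [h]), h]
    · have hacc : acc = [] ∨ acc.getLast? ≠ some x := Or.inr h
      rw [if_pos hacc, ih, List.getLast?_concat, adjDedupGo, if_pos h,
        List.append_assoc, List.singleton_append]

theorem adjDedupGo_spec (s : List String) (last : Option String)
    (hs : s.Pairwise (· ≤ ·)) (hl : ∀ p, last = some p → ∀ x ∈ s, p ≤ x) :
    (adjDedupGo last s).Pairwise (· < ·) ∧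
      ∀ y, y ∈ adjDedupGo last s ↔ (y ∈ s ∧ some y ≠ last) := by
  induction s generalizing last with
  | nil => simp [adjDedupGo]
  | cons x s ih =>
    have hx : ∀ y ∈ s, x ≤ y := (List.pairwise_cons.mp hs).1
    have hs' := (List.pairwise_cons.mp hs).2
    by_cases h : last = some x
    · rw [adjDedupGo, if_neg (by simp [h])]
      obtain ⟨pw, mem⟩ := ih last hs' (fun p hp y hy => by cases (h ▸ hp); exact hx y hy)
      refine ⟨pw, fun y => ?_⟩
      rw [mem y]
      constructor
      · rintro ⟨hy, hne⟩; exact ⟨List.mem_cons_of_mem _ hy, hne⟩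
      · rintro ⟨hy, hne⟩
        rcases List.mem_cons.mp hy with rfl | hy
        · exact absurd h.symm hne
        · exact ⟨hy, hne⟩
    · rw [adjDedupGo, if_pos h]
      obtain ⟨pw, mem⟩ := ih (some x) hs' (fun p hp y hy => by cases hp; exact hx y hy)
      constructor
      · rw [List.pairwise_cons]
        refine ⟨fun y hy => ?_, pw⟩
        obtain ⟨hys, hyne⟩ := (mem y).mp hy
        exact lt_of_le_of_ne (hx y hys) (fun hxy => hyne (by rw [hxy]))
      · intro y
        rw [List.mem_cons, mem y]
        constructor
        · rintro (rfl | ⟨hys, hyne⟩)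
          · exact ⟨List.mem_cons_self, fun hc => h hc.symm⟩
          · refine ⟨List.mem_cons_of_mem _ hys, ?_⟩
            rintro rfl
            rcases hl y rfl x List.mem_cons_self |>.lt_or_eq with hlt | rfl
            · exact absurd (le_antisymm (hx y hys) hlt.le) (fun hc => hyne (by rw [hc]))
            · exact h rfl
        · rintro ⟨hy, hne⟩
          rcases List.mem_cons.mp hy with rfl | hys
          · exact Or.inl rfl
          · by_cases hyx : y = x
            · exact Or.inl hyx
            · exact Or.inr ⟨hys, fun hc => hyx (Option.some.inj hc)⟩

-- ===== VERDICT (by name: the statement is the Claim_ definition above) =====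
theorem nameDeduplication_spec : Claim_equal_nameDeduplication := by
  intro names _
  simp only [Spec_nameDeduplication, nameDeduplication, nameDeduplication_alt]
  rw [nameDedup_keys_fold, PySem.Dict.keys_empty, PySem.Set.update_nil_left,
    PySem.List.foldl_append_singleton, foldl_adjDedup]
  simp only [List.nil_append, List.getLast?_nil]
  obtain ⟨pw, mem⟩ := adjDedupGo_spec (PySem.List.sorted (names.map PySem.Str.lower) (fun s => s))
    none (PySem.List.sorted_pairwise _ _) (by simp)
  apply PySem.List.sorted_eq_of_perm_of_pairwise_lt
  · rw [List.perm_ext_iff_of_nodup (pw.imp ne_of_lt) (PySem.Set.nodup_ofList _)]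
    intro a
    rw [mem a, PySem.Set.mem_ofList,
      (PySem.List.sorted_perm (names.map PySem.Str.lower) (fun s => s) false).mem_iff]
    simp
  · exact pw
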